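-- pv_equiv track=rewrite | github.com/ACIDKat88/DockerLLM | splitter/parser/final/hashcount.py | count_hash_ids
-- ===== SOURCE A (Python) =====
-- def count_hash_ids(metadata_list):
--     """
--     Count total occurrences of hash ids at each level in the metadata list.
--     Returns a dictionary with counts for:
--       - hash_document
--       - hash_chapter
--       - hash_section
--       - hash_subsection
--     """
--     counts = {"hash_document": 0, "hash_chapter": 0, "hash_section": 0, "hash_subsection": 0}
--     for meta in metadata_list:
--         if meta.get("hash_document"):
--             counts["hash_document"] += 1
--         if meta.get("hash_chapter"):
--             counts["hash_chapter"] += 1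
--         if meta.get("hash_section"):
--             counts["hash_section"] += 1
--         if meta.get("hash_subsection"):
--             counts["hash_subsection"] += 1
--     return counts
-- ===== SOURCE B (Python) =====
-- def count_hash_ids(metadata_list):
--     return {
--         key: sum(1 for meta in metadata_list if meta.get(key))
--         for key in ("hash_document", "hash_chapter", "hash_section", "hash_subsection")
--     }
-- ===== Notes on version B (the rewrite author's own statement) =====
-- stated objective: idiomatic
-- what changed: A makes one pass over the list maintaining four mutable counters in a dict; B is a dict comprehension that makes four independent scans of the list, one full scan per key, summing a 0/1 generator.
import Mathlib
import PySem

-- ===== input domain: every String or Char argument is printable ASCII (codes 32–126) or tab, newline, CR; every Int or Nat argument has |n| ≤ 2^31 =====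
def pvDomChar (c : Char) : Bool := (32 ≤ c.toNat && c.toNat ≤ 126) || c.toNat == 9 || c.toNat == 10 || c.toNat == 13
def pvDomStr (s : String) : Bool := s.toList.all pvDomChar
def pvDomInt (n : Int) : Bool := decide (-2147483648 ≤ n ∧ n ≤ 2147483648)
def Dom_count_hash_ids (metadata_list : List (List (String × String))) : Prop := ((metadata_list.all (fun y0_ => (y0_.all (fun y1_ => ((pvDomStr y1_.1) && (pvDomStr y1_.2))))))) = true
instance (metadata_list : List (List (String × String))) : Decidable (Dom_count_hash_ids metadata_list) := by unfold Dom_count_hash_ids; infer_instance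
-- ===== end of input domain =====

-- B rewrites A's single pass with four mutable counters as a dict comprehension doing
-- four independent scans of the list, one per key (idiomatic; same O(n)).

-- ===== PORT A =====
-- mt.get(key) used in boolean position: truthy iff the key is present with a non-empty string value
def pvGetTruthy (mt : List (String × String)) (key : String) : Bool :=
  match mt.find? (fun p => p.1 == key) with
  | some p => p.2 != ""
  | none => false

-- A's loop: one pass, four counters updated per element (counts dict with fixed keys)
def count_hash_ids (metadata_list : List (List (String × String))) : List (String × Int) :=
  let c := metadata_list.foldl
    (fun (c : Int × Int × Int × Int) mt =>
      let c1 := if pvGetTruthy mt "hash_document" then c.1 + 1 else c.1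
      let c2 := if pvGetTruthy mt "hash_chapter" then c.2.1 + 1 else c.2.1
      let c3 := if pvGetTruthy mt "hash_section" then c.2.2.1 + 1 else c.2.2.1
      let c4 := if pvGetTruthy mt "hash_subsection" then c.2.2.2 + 1 else c.2.2.2
      (c1, c2, c3, c4))
    (0, 0, 0, 0)
  [("hash_document", c.1), ("hash_chapter", c.2.1),
   ("hash_section", c.2.2.1), ("hash_subsection", c.2.2.2)]

-- ===== PORT B =====
-- B's comprehension: for each key in order, one full scan counting truthy elements
def count_hash_ids_alt (metadata_list : List (List (String × String))) : List (String × Int) :=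
  ["hash_document", "hash_chapter", "hash_section", "hash_subsection"].map
    (fun key => (key, (metadata_list.countP (fun mt => pvGetTruthy mt key) : Int)))

-- ===== PRECONDITION & SPEC =====
def Spec_count_hash_ids (metadata_list : List (List (String × String))) (out : List (String × Int)) : Prop := out = count_hash_ids_alt metadata_list
instance (metadata_list : List (List (String × String))) (out : List (String × Int)) : Decidable (Spec_count_hash_ids metadata_list out) := by unfold Spec_count_hash_ids; infer_instance

-- ===== CLAIM (what is proved, stated in full; the proofs are below) =====
def Claim_equal_count_hash_ids : Prop := ∀ (metadata_list : List (List (String × String))), Dom_count_hash_ids metadata_list → Spec_count_hash_ids metadata_list (count_hash_ids metadata_list)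

-- ===== LEMMAS AND PROOFS =====

-- A's fold adds, componentwise, the per-key count to the initial accumulator
lemma count_hash_ids_fold (metadata_list : List (List (String × String)))
    (a b c d : Int) :
    metadata_list.foldl
      (fun (c : Int × Int × Int × Int) mt =>
        let c1 := if pvGetTruthy mt "hash_document" then c.1 + 1 else c.1
        let c2 := if pvGetTruthy mt "hash_chapter" then c.2.1 + 1 else c.2.1
        let c3 := if pvGetTruthy mt "hash_section" then c.2.2.1 + 1 else c.2.2.1
        let c4 := if pvGetTruthy mt "hash_subsection" then c.2.2.2 + 1 else c.2.2.2
        (c1, c2, c3, c4))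
      (a, b, c, d)
    = (a + metadata_list.countP (fun m => pvGetTruthy m "hash_document"),
       b + metadata_list.countP (fun m => pvGetTruthy m "hash_chapter"),
       c + metadata_list.countP (fun m => pvGetTruthy m "hash_section"),
       d + metadata_list.countP (fun m => pvGetTruthy m "hash_subsection")) := by
  induction metadata_list generalizing a b c d with
  | nil => simp
  | cons hd ms ih =>
    simp only [List.foldl_cons, List.countP_cons, ih]
    push_cast
    split_ifs <;> simp [Prod.ext_iff] <;> omega

-- ===== VERDICT (by name: the statement is the Claim_ definition above) =====
theorem count_hash_ids_spec : Claim_equal_count_hash_ids := by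
  intro ml _
  show _ = _
  simp [count_hash_ids, count_hash_ids_alt, count_hash_ids_fold]
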